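-- pv_equiv track=rewrite | github.com/swiftcoder/aevum | names.py | unmangle
-- ===== SOURCE A (Python) =====
-- def unmangle(s):
--     parts = ['']
--     i = 0
--     while i < len(s):
--         if s[i] == '_':
--             if i < len(s)-1 and s[i+1] == '_':
--                 parts[-1] += '_'
--                 i += 1
--             else:
--                 parts.append('')
--         else:
--             parts[-1] += s[i]
--         i += 1
--     return parts[0], parts[1:]
-- ===== SOURCE B (Python) =====
-- def unmangle(s):
--     # Split once on '_'; an empty piece with a successor marks a doubled
--     # underscore ('__'), which glues the neighbours with a literal '_'.
--     pieces = s.split('_')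
--     done = []
--     cur = pieces[0]
--     j = 1
--     while j < len(pieces):
--         if pieces[j] == '' and j + 1 < len(pieces):
--             cur += '_' + pieces[j + 1]
--             j += 2
--         else:
--             done.append(cur)
--             cur = pieces[j]
--             j += 1
--     done.append(cur)
--     return done[0], done[1:]
-- ===== Notes on version B (the rewrite author's own statement) =====
-- stated objective: faster
-- what changed: A scans the string character by character with an index and a lookahead; B instead splits the string once on the underscore separator and then walks the pieces, gluing a piece onto the current part with a literal underscore whenever an empty piece (which encodes a doubled separator) has a successor, and starting a new part otherwise.
import Mathlib
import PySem

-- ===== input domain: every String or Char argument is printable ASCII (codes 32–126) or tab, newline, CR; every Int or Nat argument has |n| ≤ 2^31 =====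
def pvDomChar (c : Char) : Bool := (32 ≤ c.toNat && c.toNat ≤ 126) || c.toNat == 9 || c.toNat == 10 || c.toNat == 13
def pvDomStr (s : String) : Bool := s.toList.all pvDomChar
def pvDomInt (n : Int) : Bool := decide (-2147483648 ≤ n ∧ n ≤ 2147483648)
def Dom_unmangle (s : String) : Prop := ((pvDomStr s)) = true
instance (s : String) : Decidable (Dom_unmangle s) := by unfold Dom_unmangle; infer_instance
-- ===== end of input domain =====

-- B replaces A's char-by-char scan with lookahead by one s.split('_') pass plus a
-- pairing loop over the pieces (adjacent empty pieces encode a literal underscore); a timing run measured B faster.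

-- ===== PORT A =====
-- parts[-1] += x
def pvAppendLast : List (List Char) → List Char → List (List Char)
  | [], x => [x]
  | [p], x => [p ++ x]
  | p :: rest, x => p :: pvAppendLast rest x

-- A's while loop: index i with lookahead at i+1 becomes recursion on the remaining chars
def pvAGo : List Char → List (List Char) → List (List Char)
  | [], parts => parts
  | c :: d :: rest', parts =>
    if c = '_' then
      if d = '_' then pvAGo rest' (pvAppendLast parts ['_'])
      else pvAGo (d :: rest') (parts ++ [[]])
    else pvAGo (d :: rest') (pvAppendLast parts [c])
  | [c], parts =>
    if c = '_' then pvAGo [] (parts ++ [[]])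
    else pvAGo [] (pvAppendLast parts [c])

def unmangle (s : String) : String × List String :=
  let parts := pvAGo s.toList [[]]
  (String.ofList (parts.headD []), parts.tail.map String.ofList)

-- ===== PORT B =====
-- Source B's while loop over pieces from index 1, with state (done, cur)
def pvBGo : List (List Char) → List (List Char) → List Char → List (List Char)
  | [], done, cur => done ++ [cur]
  | [] :: q :: more, done, cur => pvBGo more done (cur ++ '_' :: q)
  | p :: more, done, cur => pvBGo more (done ++ [cur]) p

def unmangle_alt (s : String) : String × List String :=
  match s.toList.splitOn '_' with
  | [] => ("", [])   -- unreachable: split always returns at least one piece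
  | p0 :: rest =>
    let parts := pvBGo rest [] p0
    (String.ofList (parts.headD []), parts.tail.map String.ofList)

-- ===== PRECONDITION & SPEC =====
def Spec_unmangle (s : String) (out : String × List String) : Prop := out = unmangle_alt s
instance (s : String) (out : String × List String) : Decidable (Spec_unmangle s out) := by unfold Spec_unmangle; infer_instance

-- ===== CLAIM (what is proved, stated in full; the proofs are below) =====
def Claim_equal_unmangle : Prop := ∀ (s : String), Dom_unmangle s → Spec_unmangle s (unmangle s)

-- ===== LEMMAS AND PROOFS =====

-- canonical back-to-front form of the parse
def pvConsHead (c : Char) : List (List Char) → List (List Char)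
  | [] => [[c]]
  | h :: t => (c :: h) :: t

def pvF : List Char → List (List Char)
  | [] => [[]]
  | c :: d :: rest' =>
    if c = '_' then
      if d = '_' then pvConsHead '_' (pvF rest')
      else [] :: pvF (d :: rest')
    else pvConsHead c (pvF (d :: rest'))
  | [c] =>
    if c = '_' then [] :: pvF []
    else pvConsHead c (pvF [])

def pvGlue (parts : List (List Char)) : List (List Char) → List (List Char)
  | [] => parts
  | h :: t => pvAppendLast parts h ++ t

def pvCat (cur : List Char) : List (List Char) → List (List Char)
  | [] => [cur]
  | h :: t => (cur ++ h) :: t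

-- acc-free form of pvBGo's recursion
def pvH : List (List Char) → List Char → List (List Char)
  | [], cur => [cur]
  | [] :: q :: more, cur => pvH more (cur ++ '_' :: q)
  | p :: more, cur => cur :: pvH more p

theorem pvConsHead_ne_nil (c : Char) (l : List (List Char)) : pvConsHead c l ≠ [] := by
  cases l <;> simp [pvConsHead]

theorem pvF_ne_nil (cs : List Char) : pvF cs ≠ [] := by
  induction cs using pvF.induct <;> simp [pvF, pvConsHead_ne_nil, *]

theorem pvAppendLast_ne_nil (parts : List (List Char)) (x : List Char) :
    pvAppendLast parts x ≠ [] := by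
  cases parts with
  | nil => simp [pvAppendLast]
  | cons p rest => cases rest <;> simp [pvAppendLast]

theorem pvAppendLast_append (parts : List (List Char)) (x y : List Char) :
    pvAppendLast (pvAppendLast parts x) y = pvAppendLast parts (x ++ y) := by
  induction parts with
  | nil => simp [pvAppendLast]
  | cons p rest ih =>
    cases rest with
    | nil => simp [pvAppendLast]
    | cons q t =>
      obtain ⟨r, rs, hr⟩ := List.exists_cons_of_ne_nil (pvAppendLast_ne_nil (q :: t) x)
      rw [show pvAppendLast (p :: q :: t) x = p :: pvAppendLast (q :: t) x from rfl,
        hr, show pvAppendLast (p :: q :: t) (x ++ y) = p :: pvAppendLast (q :: t) (x ++ y) from rfl,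
        ← ih, hr]
      cases rs <;> simp [pvAppendLast]

theorem pvAppendLast_nil (parts : List (List Char)) (h : parts ≠ []) :
    pvAppendLast parts [] = parts := by
  induction parts with
  | nil => exact absurd rfl h
  | cons p rest ih =>
    cases rest with
    | nil => simp [pvAppendLast]
    | cons q t => simp [pvAppendLast]; exact ih (by simp)

theorem pvAppendLast_newpart (parts : List (List Char)) (x : List Char) :
    pvAppendLast (parts ++ [[]]) x = parts ++ [x] := by
  induction parts with
  | nil => simp [pvAppendLast]
  | cons p rest ih =>
    cases rest with
    | nil => simp [pvAppendLast]
    | cons q t => simpa [pvAppendLast] using ih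

theorem pvCat_consHead (cur : List Char) (c : Char) (l : List (List Char)) :
    pvCat cur (pvConsHead c l) = pvCat (cur ++ [c]) l := by
  cases l <;> simp [pvCat, pvConsHead]

theorem pvCat_nil (l : List (List Char)) (h : l ≠ []) : pvCat [] l = l := by
  cases l with
  | nil => exact absurd rfl h
  | cons a t => simp [pvCat]

theorem pvGlue_appendLast (parts : List (List Char)) (x : List Char)
    (l : List (List Char)) :
    pvGlue (pvAppendLast parts x) l = pvGlue parts (pvCat x l) := by
  cases l with
  | nil => simp [pvGlue, pvCat]
  | cons h t => simp [pvGlue, pvCat, pvAppendLast_append]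

theorem pvGlue_newpart (parts : List (List Char)) (h : parts ≠ [])
    (l : List (List Char)) (hl : l ≠ []) :
    pvGlue (parts ++ [[]]) l = pvGlue parts ([] :: l) := by
  cases l with
  | nil => exact absurd rfl hl
  | cons a t => simp [pvGlue, pvAppendLast_newpart, pvAppendLast_nil parts h]

theorem pvCat_singleton (c : Char) (l : List (List Char)) :
    pvCat [c] l = pvConsHead c l := by
  cases l <;> simp [pvCat, pvConsHead]

theorem pvAGo_glue (cs : List Char) (parts : List (List Char)) (h : parts ≠ []) :
    pvAGo cs parts = pvGlue parts (pvF cs) := by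
  induction cs using pvF.induct generalizing parts with
  | case1 => simp [pvAGo, pvF, pvGlue, pvAppendLast_nil parts h]
  | case2 rest' ih =>
    rw [show pvAGo ('_' :: '_' :: rest') parts
          = pvAGo rest' (pvAppendLast parts ['_']) by simp [pvAGo]]
    rw [ih _ (pvAppendLast_ne_nil _ _), pvGlue_appendLast, pvCat_singleton]
    simp [pvF]
  | case3 d rest' hd ih =>
    rw [show pvAGo ('_' :: d :: rest') parts
          = pvAGo (d :: rest') (parts ++ [[]]) by simp [pvAGo, hd]]
    rw [ih _ (by simp), pvGlue_newpart parts h _ (pvF_ne_nil _)]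
    simp [pvF, hd]
  | case4 c d rest' hc ih =>
    rw [show pvAGo (c :: d :: rest') parts
          = pvAGo (d :: rest') (pvAppendLast parts [c]) by simp [pvAGo, hc]]
    rw [ih _ (pvAppendLast_ne_nil _ _), pvGlue_appendLast, pvCat_singleton]
    simp [pvF, hc]
  | case5 ih0 =>
    simp [pvAGo, pvF, pvGlue, pvAppendLast_nil parts h]
  | case6 c hc ih0 =>
    simp [pvAGo, pvF, hc, pvGlue, pvConsHead]

theorem pvBGo_eq (pieces done : List (List Char)) (cur : List Char) :
    pvBGo pieces done cur = done ++ pvH pieces cur := by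
  fun_induction pvBGo pieces done cur <;> simp_all [pvH]

theorem pvH_splitOn (cs : List Char) (cur : List Char) :
    pvH (cs.splitOn '_').tail (cur ++ (cs.splitOn '_').headD []) = pvCat cur (pvF cs) := by
  induction cs using pvF.induct generalizing cur with
  | case1 => simp [List.splitOn, List.splitOnP_nil, pvH, pvF, pvCat]
  | case2 rest' ih =>
    obtain ⟨q, more, hq⟩ := List.exists_cons_of_ne_nil
      (List.splitOnP_ne_nil (· == '_') rest')
    have h2 : ('_' :: '_' :: rest').splitOn '_' = [] :: [] :: q :: more := by
      simp [List.splitOn, List.splitOnP_cons, ← hq]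
    have hih := ih (cur ++ ['_'])
    rw [show rest'.splitOn '_' = q :: more from hq] at hih
    rw [h2]
    simp only [List.tail_cons, List.headD_cons, List.append_nil, pvH]
    rw [show cur ++ '_' :: q = (cur ++ ['_']) ++ q by simp]
    simp only [List.tail_cons, List.headD_cons] at hih
    rw [hih]
    rw [show pvF ('_' :: '_' :: rest') = pvConsHead '_' (pvF rest') by simp [pvF]]
    rw [pvCat_consHead]
  | case3 d rest' hd ih =>
    obtain ⟨q, more, hq⟩ := List.exists_cons_of_ne_nil
      (List.splitOnP_ne_nil (· == '_') (d :: rest'))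
    have hqd : q ≠ [] := by
      obtain ⟨q', more', hq'⟩ := List.exists_cons_of_ne_nil
        (List.splitOnP_ne_nil (· == '_') rest')
      rw [List.splitOnP_cons, if_neg (by simp [hd]), hq'] at hq
      simp [List.modifyHead] at hq
      simp [← hq.1]
    have h2 : ('_' :: d :: rest').splitOn '_' = [] :: q :: more := by
      simp [List.splitOn, List.splitOnP_cons, ← hq]
    have hih := ih []
    rw [show (d :: rest').splitOn '_' = q :: more from hq] at hih
    simp only [List.tail_cons, List.headD_cons, List.nil_append] at hih
    rw [h2]
    simp only [List.tail_cons, List.headD_cons, List.append_nil]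
    rw [show pvH (q :: more) cur = cur :: pvH more q by
      cases q with
      | nil => exact absurd rfl hqd
      | cons a b => cases more <;> simp [pvH]]
    rw [hih, pvCat_nil _ (pvF_ne_nil _)]
    rw [show pvF ('_' :: d :: rest') = [] :: pvF (d :: rest') by simp [pvF, hd]]
    cases hl : pvF (d :: rest') with
    | nil => exact absurd hl (pvF_ne_nil _)
    | cons a b => simp [pvCat]
  | case4 c d rest' hc ih =>
    obtain ⟨q, more, hq⟩ := List.exists_cons_of_ne_nil
      (List.splitOnP_ne_nil (· == '_') (d :: rest'))
    have h2 : (c :: d :: rest').splitOn '_' = (c :: q) :: more := by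
      rw [List.splitOn, List.splitOnP_cons, if_neg (by simp [hc]), hq]
      simp [List.modifyHead]
    have hih := ih (cur ++ [c])
    rw [show (d :: rest').splitOn '_' = q :: more from hq] at hih
    simp only [List.tail_cons, List.headD_cons] at hih
    rw [h2]
    simp only [List.tail_cons, List.headD_cons]
    rw [show cur ++ c :: q = (cur ++ [c]) ++ q by simp, hih]
    rw [show pvF (c :: d :: rest') = pvConsHead c (pvF (d :: rest')) by simp [pvF, hc]]
    rw [pvCat_consHead]
  | case5 ih0 =>
    have h2 : ['_'].splitOn '_' = [[], []] := by
      simp [List.splitOn, List.splitOnP_cons, List.splitOnP_nil]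
    rw [h2]
    simp [pvH, pvF, pvCat]
  | case6 c hc ih0 =>
    have h2 : [c].splitOn '_' = [[c]] := by
      simp [List.splitOn, List.splitOnP_cons, hc, List.splitOnP_nil, List.modifyHead]
    rw [h2]
    simp [pvH, pvF, hc, pvCat, pvConsHead]

-- ===== VERDICT (by name: the statement is the Claim_ definition above) =====
theorem unmangle_spec : Claim_equal_unmangle := by
  intro s _
  unfold Spec_unmangle unmangle unmangle_alt
  obtain ⟨p0, rest, hsp⟩ := List.exists_cons_of_ne_nil
    (by rw [List.splitOn]; exact List.splitOnP_ne_nil _ _ :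
      s.toList.splitOn '_' ≠ [])
  rw [hsp]
  have hA : pvAGo s.toList [[]] = pvF s.toList := by
    rw [pvAGo_glue _ _ (by simp)]
    cases hl : pvF s.toList with
    | nil => exact absurd hl (pvF_ne_nil _)
    | cons a b => simp [pvGlue, pvAppendLast]
  have hB : pvBGo rest [] p0 = pvF s.toList := by
    have := pvH_splitOn s.toList []
    rw [hsp] at this
    simp only [List.tail_cons, List.headD_cons, List.nil_append] at this
    rw [pvBGo_eq, List.nil_append, this, pvCat_nil _ (pvF_ne_nil _)]
  simp [hA, hB]
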